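-- pv_equiv track=rewrite | github.com/vigge93-BTH-courses/DV1574-Programmering-python | 2.23 PLAYFAIR-chiffer.py | generate_digraphs
-- ===== SOURCE A (Python) =====
-- def get_digraphs(msg):
--     digraphs = []
--
--     while len(msg) >= 2:
--         digraphs.append(msg[:2])
--         msg = msg[2:]
--     if len(msg) == 1:
--         digraphs.append(msg)
--     return digraphs
--
-- def generate_digraphs(msg):
--     msg = msg.upper()
--     msg = msg.replace('J', 'I').replace(' ', '')
--     digraphs = []
--     while True:
--         digraphs = get_digraphs(msg)
--         for idx, d in enumerate(digraphs):
--             if len(d) > 1 and d[0] == d[1]: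
--                 msg = msg[:idx * 2 + 1] + 'X' + msg[idx*2 + 1:]
--                 break
--         new_digraphs = get_digraphs(msg)
--         if new_digraphs == digraphs:
--             break
--     if len(digraphs[len(digraphs) - 1]) == 1:
--         digraphs[len(digraphs) - 1] += 'X'
--     return digraphs
-- ===== SOURCE B (Python) =====
-- def generate_digraphs(msg):
--     s = msg.upper().replace('J', 'I').replace(' ', '')
--     digraphs = []
--     i = 0
--     n = len(s)
--     while i < n:
--         if i + 1 < n and s[i] != s[i + 1]:
--             digraphs.append(s[i:i + 2])
--             i += 2
--         else:
--             digraphs.append(s[i] + 'X')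
--             i += 1
--     return digraphs
-- ===== Notes on version B (the rewrite author's own statement) =====
-- stated objective: faster
-- what changed: A repeatedly re-splits the whole message into digraphs and rescans them from the start after every single X-insertion until a fixpoint; B builds the digraphs in one left-to-right pass, emitting the current character padded with X and advancing one position on an equal pair (or a lone final character) and advancing two otherwise.
-- outside the precondition, e.g. on generate_digraphs('  '): A raises IndexError, B returns []; on generate_digraphs('XXA'): A does not finish within the time limit, B returns ['XX', 'XA']; on generate_digraphs('AXX'): A returns ['AX', 'XX'], B returns ['AX', 'XX']
import Mathlib
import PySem

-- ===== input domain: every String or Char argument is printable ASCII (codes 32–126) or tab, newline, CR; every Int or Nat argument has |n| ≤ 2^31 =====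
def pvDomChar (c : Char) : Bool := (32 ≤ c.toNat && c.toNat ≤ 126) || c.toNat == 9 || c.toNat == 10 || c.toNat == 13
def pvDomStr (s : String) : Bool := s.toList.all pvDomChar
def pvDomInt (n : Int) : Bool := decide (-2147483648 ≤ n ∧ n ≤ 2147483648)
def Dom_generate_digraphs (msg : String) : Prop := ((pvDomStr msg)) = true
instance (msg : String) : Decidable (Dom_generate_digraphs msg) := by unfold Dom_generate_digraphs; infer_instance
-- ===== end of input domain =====

-- B replaces A's rebuild-and-rescan fixpoint loop by a single left-to-right pass (objective: faster).
-- Both Pythons share the cleaning line msg.upper().replace('J','I').replace(' ',''); ported once here.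
def pvClean (msg : String) : List Char :=
  PySem.Chars.replace (PySem.Chars.replace (PySem.Chars.upper msg.toList) ['J'] ['I']) [' '] []

-- ===== PORT A =====
-- get_digraphs: while len(msg) >= 2: append msg[:2]; msg = msg[2:] ; then the length-1 tail
def get_digraphs_chunks (msg : List Char) : List (List Char) :=
  if 2 ≤ msg.length then
    PySem.List.slice msg none (some 2) :: get_digraphs_chunks (PySem.List.slice msg (some 2) none)
  else if msg.length = 1 then [msg] else []
termination_by msg.length
decreasing_by
  rw [PySem.List.slice_from msg (show (0:Int) ≤ 2 by norm_num)]
  simp only [List.length_drop]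
  omega

-- the 'for idx, d in enumerate(digraphs): if len(d) > 1 and d[0] == d[1]: … break' scan
def find_double (k : Nat) (ds : List (List Char)) : Option Nat :=
  match ds with
  | [] => none
  | d :: rest =>
    if 1 < d.length ∧ PySem.List.pyGet? d 0 = PySem.List.pyGet? d 1 then some k
    else find_double (k + 1) rest

-- the 'while True' fixpoint loop; the fuel only makes the same computation total
-- (it is never exhausted under Pre_, see main_lemma below)
def digraph_loop (fuel : Nat) (msg : List Char) : List (List Char) :=
  match fuel with
  | 0 => get_digraphs_chunks msg
  | fuel + 1 =>
    let digraphs := get_digraphs_chunks msg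
    match find_double 0 digraphs with
    | none =>
      let new := get_digraphs_chunks msg
      if new = digraphs then digraphs else digraph_loop fuel msg
    | some idx =>
      let msg' := PySem.List.slice msg none (some ((idx : Int) * 2 + 1)) ++
        'X' :: PySem.List.slice msg (some ((idx : Int) * 2 + 1)) none
      let new := get_digraphs_chunks msg'
      if new = digraphs then digraphs else digraph_loop fuel msg'

-- if len(digraphs[len(digraphs)-1]) == 1: digraphs[-1] += 'X'  (the index is in range under Pre_)
def pad_last (ds : List (List Char)) : List (List Char) :=
  if (PySem.List.pyGetD ds (PySem.List.len ds - 1) []).length = 1 then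
    PySem.List.pySetD ds (PySem.List.len ds - 1)
      (PySem.List.pyGetD ds (PySem.List.len ds - 1) [] ++ ['X'])
  else ds

def generate_digraphs (msg : String) : List String :=
  let m := pvClean msg
  (pad_last (digraph_loop (m.length + 1) m)).map (fun d => String.ofList d)

-- ===== PORT B =====
-- single left-to-right pass: unequal pair → take two chars; equal pair or lone last char → pair with 'X'
def alt_pass : List Char → List (List Char)
  | [] => []
  | [c] => [[c, 'X']]
  | c1 :: c2 :: rest =>
    if c1 ≠ c2 then [c1, c2] :: alt_pass rest
    else [c1, 'X'] :: alt_pass (c2 :: rest)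

def generate_digraphs_alt (msg : String) : List String :=
  (alt_pass (pvClean msg)).map (fun d => String.ofList d)

-- ===== PRECONDITION & SPEC =====
-- Pre_ excludes messages whose cleaned form is empty (A indexes the last digraph of an empty list:
-- IndexError) or contains two adjacent X letters (A's X-insertion loop then never reaches a fixpoint
-- and can run forever, e.g. on "XXA"; on cleaned messages like "AXX", where the double X falls across
-- a digraph boundary and A still returns, B happens to return the same value).
def Pre_generate_digraphs (msg : String) : Prop :=
  pvClean msg ≠ [] ∧ PySem.Chars.isIn ['X', 'X'] (pvClean msg) = false
instance (msg : String) : Decidable (Pre_generate_digraphs msg) := by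
  unfold Pre_generate_digraphs; infer_instance
def pvWitness_generate_digraphs : String := "Hello World"

def Spec_generate_digraphs (msg : String) (out : List String) : Prop := out = generate_digraphs_alt msg
instance (msg : String) (out : List String) : Decidable (Spec_generate_digraphs msg out) := by
  unfold Spec_generate_digraphs; infer_instance

-- ===== CLAIM (what is proved, stated in full; the proofs are below) =====
def Claim_equal_generate_digraphs : Prop := ∀ (msg : String), Dom_generate_digraphs msg → Pre_generate_digraphs msg → Spec_generate_digraphs msg (generate_digraphs msg)

-- ===== LEMMAS AND PROOFS =====

theorem gd_nil : get_digraphs_chunks [] = [] := by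
  rw [get_digraphs_chunks.eq_def]; simp

theorem gd_single (c : Char) : get_digraphs_chunks [c] = [[c]] := by
  rw [get_digraphs_chunks.eq_def]; simp

theorem gd_cons (a b : Char) (t : List Char) :
    get_digraphs_chunks (a :: b :: t) = [a, b] :: get_digraphs_chunks t := by
  rw [get_digraphs_chunks.eq_def]
  have h2 : PySem.List.slice (a :: b :: t) none (some 2) = [a, b] := by
    rw [PySem.List.slice_to _ (show (0:Int) ≤ 2 by norm_num)]; rfl
  have h3 : PySem.List.slice (a :: b :: t) (some 2) none = t := by
    rw [PySem.List.slice_from _ (show (0:Int) ≤ 2 by norm_num)]; rfl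
  simp [h2, h3]

theorem gd_flatten (s : List Char) : (get_digraphs_chunks s).flatten = s := by
  match s with
  | [] => simp [gd_nil]
  | [c] => simp [gd_single]
  | a :: b :: t => rw [gd_cons]; simp [gd_flatten t]

theorem pad_last_cons (x y : List Char) (ds : List (List Char)) :
    pad_last (x :: y :: ds) = x :: pad_last (y :: ds) := by
  unfold pad_last
  have hlen : PySem.List.len (x :: y :: ds) - 1 = ((ds.length + 1 : Nat) : Int) := by
    simp only [PySem.List.len_eq, List.length_cons]; push_cast; ring
  have hlen2 : PySem.List.len (y :: ds) - 1 = ((ds.length : Nat) : Int) := by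
    simp only [PySem.List.len_eq, List.length_cons]; push_cast; ring
  rw [hlen, hlen2]
  simp only [PySem.List.pyGetD_natCast, PySem.List.pySetD_natCast, List.getD_cons_succ]
  by_cases hc : ((y :: ds).getD ds.length []).length = 1
  · rw [if_pos hc, if_pos hc]; rfl
  · rw [if_neg hc, if_neg hc]

theorem pad_last_pair (a b : Char) : pad_last [[a, b]] = [[a, b]] := by
  unfold pad_last
  norm_num [PySem.List.len_eq, PySem.List.pyGetD_natCast]

theorem pad_last_nil : pad_last [] = [] := by decide

theorem pad_last_single (c : Char) : pad_last [[c]] = [[c, 'X']] := by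
  unfold pad_last
  norm_num [PySem.List.len_eq]
  simp [PySem.List.pySetD, PySem.List.pySet?, PySem.List.pyIdx?, List.set]

theorem adj_mem_infix (a b : Char) (s : List Char) (h : (a, b) ∈ s.zip s.tail) :
    [a, b] <:+: s := by
  induction s with
  | nil => simp at h
  | cons x rest ih =>
    cases rest with
    | nil => simp at h
    | cons y t =>
      simp only [List.tail_cons, List.zip_cons_cons, List.mem_cons] at h
      rcases h with h | h
      · rw [Prod.mk.injEq] at h
        obtain ⟨rfl, rfl⟩ := h
        exact ⟨[], t, by simp⟩
      · exact (ih (by simpa using h)).trans (List.infix_cons (List.infix_refl _))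

theorem adj_decomp (p : List Char) (c : Char) (t : List Char) :
    ∃ A0 : List (Char × Char),
      (p ++ c :: c :: t).zip (p ++ c :: c :: t).tail = A0 ++ (c, c) :: (c :: t).zip t ∧
      (p ++ c :: 'X' :: c :: t).zip (p ++ c :: 'X' :: c :: t).tail =
        A0 ++ (c, 'X') :: ('X', c) :: (c :: t).zip t := by
  induction p with
  | nil => exact ⟨[], by simp, by simp⟩
  | cons a p ih =>
    obtain ⟨A0, h1, h2⟩ := ih
    cases p with
    | nil => exact ⟨(a, c) :: A0, by simp_all, by simp_all⟩
    | cons b p' => exact ⟨(a, b) :: A0, by simp_all, by simp_all⟩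

theorem find_none (s : List Char) :
    ∀ k, find_double k (get_digraphs_chunks s) = none →
      alt_pass s = pad_last (get_digraphs_chunks s) := by
  match s with
  | [] => intro k _; rw [gd_nil, pad_last_nil, alt_pass]
  | [c] => intro k _; rw [gd_single, pad_last_single, alt_pass]
  | a :: b :: t =>
    intro k h
    rw [gd_cons] at h ⊢
    rw [find_double] at h
    by_cases hab : a = b
    · rw [if_pos ⟨by norm_num, by subst hab; simp [PySem.List.pyGet?, PySem.List.pyIdx?]⟩] at h
      exact absurd h (by simp)
    · rw [if_neg (by simp [PySem.List.pyGet?, PySem.List.pyIdx?, hab])] at h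
      rw [alt_pass, if_pos hab]
      rw [find_none t _ h]
      match t with
      | [] => rw [gd_nil]; exact (pad_last_pair a b).symm
      | [c] => rw [gd_single, pad_last_cons]
      | c :: d :: t'' => rw [gd_cons, pad_last_cons]

theorem find_some (s : List Char) :
    ∀ k idx, find_double k (get_digraphs_chunks s) = some idx →
      ∃ p c t, s = p ++ c :: c :: t ∧ p.length = 2 * (idx - k) ∧ k ≤ idx ∧
        (∀ u v : List Char, alt_pass u = alt_pass v → alt_pass (p ++ u) = alt_pass (p ++ v)) := by
  match s with
  | [] => intro k idx h; rw [gd_nil] at h; simp [find_double] at h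
  | [c] =>
    intro k idx h
    rw [gd_single] at h
    simp [find_double, PySem.List.pyGet?, PySem.List.pyIdx?] at h
  | a :: b :: t =>
    intro k idx h
    rw [gd_cons] at h
    rw [find_double] at h
    by_cases hab : a = b
    · subst hab
      rw [if_pos ⟨by norm_num, by simp [PySem.List.pyGet?, PySem.List.pyIdx?]⟩] at h
      have hik : idx = k := by simpa using h.symm
      subst hik
      exact ⟨[], a, t, by simp, by simp, le_refl _, fun u v huv => by simpa using huv⟩
    · rw [if_neg (by simp [PySem.List.pyGet?, PySem.List.pyIdx?, hab])] at h
      obtain ⟨p', c, t', hs, hlen, hk, hcong⟩ := find_some t (k + 1) idx h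
      refine ⟨a :: b :: p', c, t', by rw [hs]; simp, ?_, by omega, ?_⟩
      · simp only [List.length_cons, hlen]; omega
      · intro u v huv
        simp only [List.cons_append]
        rw [alt_pass, alt_pass, if_pos hab, if_pos hab, hcong u v huv]

theorem main_lemma (fuel : Nat) (s : List Char)
    (hxx : ('X', 'X') ∉ s.zip s.tail)
    (hcnt : (s.zip s.tail).countP (fun p => p.1 == p.2) < fuel) :
    pad_last (digraph_loop fuel s) = alt_pass s := by
  induction fuel generalizing s with
  | zero => omega
  | succ fuel ih =>
    rw [digraph_loop]
    cases hfd : find_double 0 (get_digraphs_chunks s) with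
    | none =>
      dsimp only
      rw [if_pos rfl]
      exact (find_none s 0 hfd).symm
    | some idx =>
      dsimp only
      obtain ⟨p, c, t, hs, hlen, -, hcong⟩ := find_some s 0 idx hfd
      simp only [Nat.sub_zero] at hlen
      have hidx : ((idx : Int) * 2 + 1) = ((p.length + 1 : Nat) : Int) := by push_cast; omega
      have hslice1 : PySem.List.slice s none (some ((idx : Int) * 2 + 1)) = p ++ [c] := by
        rw [hidx, PySem.List.slice_to_natCast, hs, List.take_append]
        simp
      have hslice2 : PySem.List.slice s (some ((idx : Int) * 2 + 1)) none = c :: t := by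
        rw [hidx, PySem.List.slice_from_natCast, hs, List.drop_append]
        simp
      have hmsg' : PySem.List.slice s none (some ((idx : Int) * 2 + 1)) ++
          'X' :: PySem.List.slice s (some ((idx : Int) * 2 + 1)) none
          = p ++ c :: 'X' :: c :: t := by
        rw [hslice1, hslice2]; simp
      rw [hmsg']
      obtain ⟨A0, hA1, hA2⟩ := adj_decomp p c t
      have hcX : c ≠ 'X' := by
        intro rfl_c
        apply hxx
        rw [hs, hA1]
        simp [rfl_c]
      have hne : get_digraphs_chunks (p ++ c :: 'X' :: c :: t) ≠ get_digraphs_chunks s := by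
        intro heq
        have h1 := congrArg List.flatten heq
        rw [gd_flatten, gd_flatten, hs] at h1
        have h2 := congrArg List.length h1
        simp at h2
      rw [if_neg hne]
      have hxx' : ('X', 'X') ∉ (p ++ c :: 'X' :: c :: t).zip (p ++ c :: 'X' :: c :: t).tail := by
        rw [hA2]
        intro hmem
        simp only [List.mem_append, List.mem_cons] at hmem
        rcases hmem with h | h | h | h
        · exact hxx (by rw [hs, hA1]; simp [h])
        · exact hcX (by rw [Prod.mk.injEq] at h; exact h.1.symm)
        · exact hcX (by rw [Prod.mk.injEq] at h; exact h.2.symm)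
        · exact hxx (by rw [hs, hA1]; simp [h])
      have hcnt' : ((p ++ c :: 'X' :: c :: t).zip (p ++ c :: 'X' :: c :: t).tail).countP
          (fun q => q.1 == q.2) < fuel := by
        have hS : (s.zip s.tail).countP (fun q => q.1 == q.2) =
            A0.countP (fun q => q.1 == q.2) + 1 + ((c :: t).zip t).countP (fun q => q.1 == q.2) := by
          rw [hs, hA1]; simp [List.countP_append]; ring
        have hS' : ((p ++ c :: 'X' :: c :: t).zip (p ++ c :: 'X' :: c :: t).tail).countP
            (fun q => q.1 == q.2) =
            A0.countP (fun q => q.1 == q.2) + ((c :: t).zip t).countP (fun q => q.1 == q.2) := by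
          rw [hA2]
          simp [List.countP_append, hcX, Ne.symm hcX]
        omega
      rw [ih _ hxx' hcnt', hs]
      apply hcong
      rw [show alt_pass (c :: c :: t) = [c, 'X'] :: alt_pass (c :: t) from by
        rw [alt_pass]; simp]
      rw [alt_pass]
      simp [hcX]
theorem noXX_of_pre (m : List Char) (h : PySem.Chars.isIn ['X', 'X'] m = false) :
    ('X', 'X') ∉ m.zip m.tail := by
  intro hmem
  rw [PySem.Chars.isIn_eq_false_iff] at h
  exact h (adj_mem_infix 'X' 'X' m hmem)

-- ===== VERDICT (by name: the statement is the Claim_ definition above) =====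
theorem generate_digraphs_spec : Claim_equal_generate_digraphs := by
  intro msg _ hpre
  unfold Spec_generate_digraphs generate_digraphs generate_digraphs_alt
  dsimp only
  congr 1
  apply main_lemma
  · exact noXX_of_pre _ hpre.2
  · have h1 := List.countP_le_length (l := (pvClean msg).zip (pvClean msg).tail)
      (p := fun q => q.1 == q.2)
    have h2 : ((pvClean msg).zip (pvClean msg).tail).length ≤ (pvClean msg).length := by
      simp [List.length_zip]
    omega
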